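-- pv_equiv track=rewrite | github.com/dgabrielson/django-dept-publications | publications/utils.py | latex_to_unicode_cyrillic
-- ===== SOURCE A (Python) =====
-- def latex_to_unicode_cyrillic(s):
--     table = {
--         "\\cprime": "\u042c",  # soft sign
--         "\\cdprime": "\u042a",  # hard sign
--         "\\cprime": "ь",  # "soft sign"
--         "\\cdprime": "ъ",  # "hard sign"
--         "\\u{i}": "й",  # "i-kratkaya"
--         '\\"{e}': "ё",  # "yoh"
--         "\\`{e}": "э",  # "e-oborotnoye"
--         "\\`{E}": "Э",  # "E-oborotnoye"
--     }
--     for k, v in table.items():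
--         s = s.replace(k, v)
--     return s
-- ===== SOURCE B (Python) =====
-- def latex_to_unicode_cyrillic(s):
--     # One left-to-right pass: at each position try the escape table (duplicate
--     # keys of the original collapsed, last value wins), emit the Cyrillic char
--     # and skip the escape, otherwise copy the character.
--     pairs = [
--         ("\\cprime", "ь"),
--         ("\\cdprime", "ъ"),
--         ("\\u{i}", "й"),
--         ('\\"{e}', "ё"),
--         ("\\`{e}", "э"),
--         ("\\`{E}", "Э"),
--     ]
--     out = []
--     i = 0
--     n = len(s)
--     while i < n:
--         for k, v in pairs:
--             if s.startswith(k, i):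
--                 out.append(v)
--                 i += len(k)
--                 break
--         else:
--             out.append(s[i])
--             i += 1
--     return "".join(out)
-- ===== Notes on version B (the rewrite author's own statement) =====
-- stated objective: alternative
-- what changed: B replaces A's six sequential full-string s.replace passes by a single left-to-right scan that tries the (duplicate-collapsed) escape table at each position and builds the output once.
import Mathlib
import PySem

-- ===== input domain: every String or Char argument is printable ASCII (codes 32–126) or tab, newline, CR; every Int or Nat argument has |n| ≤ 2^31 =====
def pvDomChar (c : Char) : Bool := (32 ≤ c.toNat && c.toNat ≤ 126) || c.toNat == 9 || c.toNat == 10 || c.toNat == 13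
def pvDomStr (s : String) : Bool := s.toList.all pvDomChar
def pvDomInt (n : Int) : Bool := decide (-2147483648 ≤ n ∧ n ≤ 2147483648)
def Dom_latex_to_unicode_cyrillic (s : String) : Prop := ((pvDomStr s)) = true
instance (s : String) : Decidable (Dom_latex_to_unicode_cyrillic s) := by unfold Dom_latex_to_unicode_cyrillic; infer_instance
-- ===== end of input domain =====

-- B replaces A's six sequential full-string replace passes by one left-to-right scan
-- over the characters (alternative decomposition, same exact output).

-- ===== PORT A =====
-- the dict literal of A: duplicate keys overwrite in place (last value wins)
def pvTableA : PySem.Dict String String :=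
  ((((((((PySem.Dict.empty.insert "\\cprime" "Ь").insert "\\cdprime" "Ъ").insert
      "\\cprime" "ь").insert "\\cdprime" "ъ").insert "\\u{i}" "й").insert
      "\\\"{e}" "ё").insert "\\`{e}" "э").insert "\\`{E}" "Э")

def latex_to_unicode_cyrillic (s : String) : String :=
  pvTableA.items.foldl (fun acc kv => PySem.Str.replace acc kv.1 kv.2) s

-- ===== PORT B =====
-- the collapsed escape table of Source B, as (escape, char) pairs on code points
def pvK1 : List Char := ['\\','c','p','r','i','m','e']
def pvK2 : List Char := ['\\','c','d','p','r','i','m','e']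
def pvK3 : List Char := ['\\','u','{','i','}']
def pvK4 : List Char := ['\\','"','{','e','}']
def pvK5 : List Char := ['\\','`','{','e','}']
def pvK6 : List Char := ['\\','`','{','E','}']

-- the single left-to-right scan of Source B (while-loop with startswith tests, in table order)
def pvScan : List Char → List Char
  | [] => []
  | c :: t =>
    if pvK1.isPrefixOf (c :: t) then 'ь' :: pvScan ((c :: t).drop pvK1.length)
    else if pvK2.isPrefixOf (c :: t) then 'ъ' :: pvScan ((c :: t).drop pvK2.length)
    else if pvK3.isPrefixOf (c :: t) then 'й' :: pvScan ((c :: t).drop pvK3.length)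
    else if pvK4.isPrefixOf (c :: t) then 'ё' :: pvScan ((c :: t).drop pvK4.length)
    else if pvK5.isPrefixOf (c :: t) then 'э' :: pvScan ((c :: t).drop pvK5.length)
    else if pvK6.isPrefixOf (c :: t) then 'Э' :: pvScan ((c :: t).drop pvK6.length)
    else c :: pvScan t
termination_by l => l.length
decreasing_by all_goals simp [pvK1, pvK2, pvK3, pvK4, pvK5, pvK6]

def latex_to_unicode_cyrillic_alt (s : String) : String :=
  String.ofList (pvScan s.toList)

-- ===== PRECONDITION & SPEC =====
def Spec_latex_to_unicode_cyrillic (s : String) (out : String) : Prop := out = latex_to_unicode_cyrillic_alt s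
instance (s : String) (out : String) : Decidable (Spec_latex_to_unicode_cyrillic s out) := by unfold Spec_latex_to_unicode_cyrillic; infer_instance

-- ===== CLAIM (what is proved, stated in full; the proofs are below) =====
def Claim_equal_latex_to_unicode_cyrillic : Prop := ∀ (s : String), Dom_latex_to_unicode_cyrillic s → Spec_latex_to_unicode_cyrillic s (latex_to_unicode_cyrillic s)

-- ===== LEMMAS AND PROOFS =====

-- the six replace passes of A, on code points
def pvR1 (l : List Char) : List Char := PySem.Chars.replace l pvK1 ['ь']
def pvR2 (l : List Char) : List Char := PySem.Chars.replace l pvK2 ['ъ']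
def pvR3 (l : List Char) : List Char := PySem.Chars.replace l pvK3 ['й']
def pvR4 (l : List Char) : List Char := PySem.Chars.replace l pvK4 ['ё']
def pvR5 (l : List Char) : List Char := PySem.Chars.replace l pvK5 ['э']
def pvR6 (l : List Char) : List Char := PySem.Chars.replace l pvK6 ['Э']
def pvChain (l : List Char) : List Char := pvR6 (pvR5 (pvR4 (pvR3 (pvR2 (pvR1 l)))))

lemma pv_go_zero (old new l acc : List Char) : PySem.Chars.replace.go old new 0 l acc = acc.reverse ++ l := by
  rw [PySem.Chars.replace.go]

lemma pv_go_nil (old new acc : List Char) (f : Nat) : PySem.Chars.replace.go old new (f+1) [] acc = acc.reverse := by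
  rw [PySem.Chars.replace.go]; omega

lemma pv_go_cons (old new acc t : List Char) (c : Char) (f : Nat) :
    PySem.Chars.replace.go old new (f+1) (c::t) acc =
      if old.isPrefixOf (c::t) then PySem.Chars.replace.go old new f ((c::t).drop old.length) (new.reverse ++ acc)
      else PySem.Chars.replace.go old new f t (c :: acc) := by
  rw [PySem.Chars.replace.go]

lemma pv_replace_eq_go (old new l : List Char) (hold : old ≠ []) :
    PySem.Chars.replace l old new = PySem.Chars.replace.go old new l.length l [] := by
  rw [PySem.Chars.replace, if_neg (by simp [hold])]

lemma pv_go_spec (old new : List Char) (hold : old ≠ []) :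
    ∀ fuel l acc, l.length ≤ fuel →
      PySem.Chars.replace.go old new fuel l acc = acc.reverse ++ PySem.Chars.replace l old new := by
  intro fuel
  induction fuel using Nat.strong_induction_on with
  | _ fuel IH =>
    intro l acc hlen
    match fuel, l with
    | 0, l =>
      have hl : l = [] := by cases l <;> simp_all
      subst hl
      rw [pv_go_zero, pv_replace_eq_go _ _ _ hold]
      simp [pv_go_zero]
    | f+1, [] =>
      rw [pv_go_nil, pv_replace_eq_go _ _ _ hold]
      simp [pv_go_zero]
    | f+1, c :: t =>
      rw [pv_go_cons, pv_replace_eq_go _ _ _ hold]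
      simp only [List.length_cons]
      rw [pv_go_cons]
      have hof : old.length ≥ 1 := by cases old <;> simp_all
      have hlen' : t.length + 1 ≤ f + 1 := by simpa using hlen
      by_cases hp : old.isPrefixOf (c::t) = true
      · rw [if_pos hp, if_pos hp]
        have hd : ((c::t).drop old.length).length ≤ f := by
          simp [List.length_drop]; omega
        have hd2 : ((c::t).drop old.length).length ≤ t.length := by
          simp [List.length_drop]; omega
        rw [IH f (by omega) _ _ hd, IH t.length (by omega) _ _ hd2]
        simp
      · rw [if_neg hp, if_neg hp]
        have ht : t.length ≤ f := by simp at hlen; omega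
        rw [IH f (by omega) _ _ ht, IH t.length (by omega) _ _ (le_refl _)]
        simp

lemma pv_replace_nil (old new : List Char) (hold : old ≠ []) :
    PySem.Chars.replace [] old new = [] := by
  rw [pv_replace_eq_go _ _ _ hold]; simp [pv_go_zero]

lemma pv_replace_cons_neg (old new : List Char) (hold : old ≠ []) (c : Char) (t : List Char)
    (h : old.isPrefixOf (c :: t) = false) :
    PySem.Chars.replace (c :: t) old new = c :: PySem.Chars.replace t old new := by
  rw [pv_replace_eq_go _ _ _ hold]
  simp only [List.length_cons]
  rw [pv_go_cons, if_neg (by simp [h]), pv_go_spec old new hold t.length t [c] (le_refl _)]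
  simp

lemma pv_replace_pos (old new l : List Char) (hold : old ≠ [])
    (h : old.isPrefixOf l = true) :
    PySem.Chars.replace l old new = new ++ PySem.Chars.replace (l.drop old.length) old new := by
  match l with
  | [] =>
    have hpre := List.isPrefixOf_iff_prefix.mp h
    have : old = [] := List.prefix_nil.mp hpre
    exact absurd this hold
  | c :: t =>
    rw [pv_replace_eq_go _ _ _ hold]
    simp only [List.length_cons]
    rw [pv_go_cons, if_pos h]
    have hd : ((c::t).drop old.length).length ≤ t.length := by
      simp [List.length_drop]
      have : 1 ≤ old.length := by cases old <;> simp_all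
      omega
    rw [pv_go_spec old new hold t.length _ _ hd]
    simp

lemma pv_prefix_reflect (v : Char) (old : List Char) (hold : old ≠ []) :
    ∀ l w, v ∉ w → w <+: PySem.Chars.replace l old [v] → w <+: l := by
  intro l
  induction hl : l.length using Nat.strong_induction_on generalizing l with
  | _ n IH =>
    intro w hv hw
    match l with
    | [] =>
      rw [pv_replace_nil _ _ hold] at hw
      simpa using hw
    | c :: t =>
      by_cases hp : old.isPrefixOf (c :: t) = true
      · rw [pv_replace_pos _ _ _ hold hp] at hw
        match w, hw with
        | [], _ => exact List.nil_prefix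
        | x :: w', hw =>
          have hx : x = v := (List.cons_prefix_cons.mp hw).1
          exact absurd (hx ▸ List.mem_cons_self) hv
      · rw [pv_replace_cons_neg _ _ hold _ _ ((Bool.not_eq_true _).mp hp)] at hw
        match w, hw with
        | [], _ => exact List.nil_prefix
        | x :: w', hw =>
          obtain ⟨hx, hw'⟩ := List.cons_prefix_cons.mp hw
          have ht : w' <+: t := by
            refine IH t.length ?_ t rfl w' (by simp_all) hw'
            subst hl; simp
          exact hx ▸ List.cons_prefix_cons.mpr ⟨rfl, ht⟩

lemma pv_pass_block (old new old' : List Char) (holdeq : old = '\\' :: old')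
    (p : List Char) (hp : '\\' ∉ p) :
    ∀ X, PySem.Chars.replace (p ++ X) old new = p ++ PySem.Chars.replace X old new := by
  induction p with
  | nil => simp
  | cons c p' IH =>
    intro X
    have hc : c ≠ '\\' := by intro h; exact hp (h ▸ List.mem_cons_self)
    have hne : old.isPrefixOf (c :: (p' ++ X)) = false := by
      subst holdeq; simp [List.isPrefixOf]; intro h; exact absurd h.symm hc
    rw [List.cons_append, pv_replace_cons_neg _ _ (by simp [holdeq]) _ _ hne,
        IH (by simp_all) X]
    simp

lemma pv_pass_key (old old' p p' new : List Char) (ho : old = '\\' :: old')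
    (hpe : p = '\\' :: p') (hp' : '\\' ∉ p')
    (hne : ∀ X, old.isPrefixOf (p ++ X) = false) :
    ∀ X, PySem.Chars.replace (p ++ X) old new = p ++ PySem.Chars.replace X old new := by
  intro X
  rw [hpe, List.cons_append,
      pv_replace_cons_neg _ _ (by simp [ho]) _ _ (by have := hne X; rwa [hpe, List.cons_append] at this),
      pv_pass_block old new old' ho p' hp' X, List.cons_append]

lemma pv_chain_match1 : ∀ X, pvChain (pvK1 ++ X) = 'ь' :: pvChain X := by
  intro X
  unfold pvChain pvR1 pvR2 pvR3 pvR4 pvR5 pvR6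
  rw [pv_replace_pos _ _ _ (by decide) (List.isPrefixOf_iff_prefix.mpr (List.prefix_append _ _)),
      List.drop_left]
  rw [pv_pass_block pvK2 ['ъ'] _ rfl ['ь'] (by decide)]
  rw [pv_pass_block pvK3 ['й'] _ rfl ['ь'] (by decide)]
  rw [pv_pass_block pvK4 ['ё'] _ rfl ['ь'] (by decide)]
  rw [pv_pass_block pvK5 ['э'] _ rfl ['ь'] (by decide)]
  rw [pv_pass_block pvK6 ['Э'] _ rfl ['ь'] (by decide)]
  simp

lemma pv_chain_match2 : ∀ X, pvChain (pvK2 ++ X) = 'ъ' :: pvChain X := by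
  intro X
  unfold pvChain pvR1 pvR2 pvR3 pvR4 pvR5 pvR6
  rw [pv_pass_key pvK1 _ pvK2 _ ['ь'] rfl rfl (by decide) (by intro Y; simp [pvK1, pvK2, List.isPrefixOf])]
  rw [pv_replace_pos _ _ _ (by decide) (List.isPrefixOf_iff_prefix.mpr (List.prefix_append _ _)),
      List.drop_left]
  rw [pv_pass_block pvK3 ['й'] _ rfl ['ъ'] (by decide)]
  rw [pv_pass_block pvK4 ['ё'] _ rfl ['ъ'] (by decide)]
  rw [pv_pass_block pvK5 ['э'] _ rfl ['ъ'] (by decide)]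
  rw [pv_pass_block pvK6 ['Э'] _ rfl ['ъ'] (by decide)]
  simp

lemma pv_chain_match3 : ∀ X, pvChain (pvK3 ++ X) = 'й' :: pvChain X := by
  intro X
  unfold pvChain pvR1 pvR2 pvR3 pvR4 pvR5 pvR6
  rw [pv_pass_key pvK1 _ pvK3 _ ['ь'] rfl rfl (by decide) (by intro Y; simp [pvK1, pvK3, List.isPrefixOf])]
  rw [pv_pass_key pvK2 _ pvK3 _ ['ъ'] rfl rfl (by decide) (by intro Y; simp [pvK2, pvK3, List.isPrefixOf])]
  rw [pv_replace_pos _ _ _ (by decide) (List.isPrefixOf_iff_prefix.mpr (List.prefix_append _ _)),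
      List.drop_left]
  rw [pv_pass_block pvK4 ['ё'] _ rfl ['й'] (by decide)]
  rw [pv_pass_block pvK5 ['э'] _ rfl ['й'] (by decide)]
  rw [pv_pass_block pvK6 ['Э'] _ rfl ['й'] (by decide)]
  simp

lemma pv_chain_match4 : ∀ X, pvChain (pvK4 ++ X) = 'ё' :: pvChain X := by
  intro X
  unfold pvChain pvR1 pvR2 pvR3 pvR4 pvR5 pvR6
  rw [pv_pass_key pvK1 _ pvK4 _ ['ь'] rfl rfl (by decide) (by intro Y; simp [pvK1, pvK4, List.isPrefixOf])]
  rw [pv_pass_key pvK2 _ pvK4 _ ['ъ'] rfl rfl (by decide) (by intro Y; simp [pvK2, pvK4, List.isPrefixOf])]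
  rw [pv_pass_key pvK3 _ pvK4 _ ['й'] rfl rfl (by decide) (by intro Y; simp [pvK3, pvK4, List.isPrefixOf])]
  rw [pv_replace_pos _ _ _ (by decide) (List.isPrefixOf_iff_prefix.mpr (List.prefix_append _ _)),
      List.drop_left]
  rw [pv_pass_block pvK5 ['э'] _ rfl ['ё'] (by decide)]
  rw [pv_pass_block pvK6 ['Э'] _ rfl ['ё'] (by decide)]
  simp

lemma pv_chain_match5 : ∀ X, pvChain (pvK5 ++ X) = 'э' :: pvChain X := by
  intro X
  unfold pvChain pvR1 pvR2 pvR3 pvR4 pvR5 pvR6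
  rw [pv_pass_key pvK1 _ pvK5 _ ['ь'] rfl rfl (by decide) (by intro Y; simp [pvK1, pvK5, List.isPrefixOf])]
  rw [pv_pass_key pvK2 _ pvK5 _ ['ъ'] rfl rfl (by decide) (by intro Y; simp [pvK2, pvK5, List.isPrefixOf])]
  rw [pv_pass_key pvK3 _ pvK5 _ ['й'] rfl rfl (by decide) (by intro Y; simp [pvK3, pvK5, List.isPrefixOf])]
  rw [pv_pass_key pvK4 _ pvK5 _ ['ё'] rfl rfl (by decide) (by intro Y; simp [pvK4, pvK5, List.isPrefixOf])]
  rw [pv_replace_pos _ _ _ (by decide) (List.isPrefixOf_iff_prefix.mpr (List.prefix_append _ _)),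
      List.drop_left]
  rw [pv_pass_block pvK6 ['Э'] _ rfl ['э'] (by decide)]
  simp

lemma pv_chain_match6 : ∀ X, pvChain (pvK6 ++ X) = 'Э' :: pvChain X := by
  intro X
  unfold pvChain pvR1 pvR2 pvR3 pvR4 pvR5 pvR6
  rw [pv_pass_key pvK1 _ pvK6 _ ['ь'] rfl rfl (by decide) (by intro Y; simp [pvK1, pvK6, List.isPrefixOf])]
  rw [pv_pass_key pvK2 _ pvK6 _ ['ъ'] rfl rfl (by decide) (by intro Y; simp [pvK2, pvK6, List.isPrefixOf])]
  rw [pv_pass_key pvK3 _ pvK6 _ ['й'] rfl rfl (by decide) (by intro Y; simp [pvK3, pvK6, List.isPrefixOf])]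
  rw [pv_pass_key pvK4 _ pvK6 _ ['ё'] rfl rfl (by decide) (by intro Y; simp [pvK4, pvK6, List.isPrefixOf])]
  rw [pv_pass_key pvK5 _ pvK6 _ ['э'] rfl rfl (by decide) (by intro Y; simp [pvK5, pvK6, List.isPrefixOf])]
  rw [pv_replace_pos _ _ _ (by decide) (List.isPrefixOf_iff_prefix.mpr (List.prefix_append _ _)),
      List.drop_left]
  simp

lemma pv_chain_cons_bs (t : List Char)
    (h1 : pvK1.isPrefixOf ('\\'::t) = false) (h2 : pvK2.isPrefixOf ('\\'::t) = false)
    (h3 : pvK3.isPrefixOf ('\\'::t) = false) (h4 : pvK4.isPrefixOf ('\\'::t) = false)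
    (h5 : pvK5.isPrefixOf ('\\'::t) = false) (h6 : pvK6.isPrefixOf ('\\'::t) = false) :
    pvChain ('\\'::t) = '\\' :: pvChain t := by
  unfold pvChain pvR1 pvR2 pvR3 pvR4 pvR5 pvR6
  rw [pv_replace_cons_neg pvK1 ['ь'] (by decide) '\\' t h1]
  have h2' : pvK2.isPrefixOf ('\\' :: PySem.Chars.replace t pvK1 ['ь']) = false := by
    refine Bool.eq_false_iff.mpr fun hb => ?_
    have hpre := List.isPrefixOf_iff_prefix.mp hb
    unfold pvK2 at hpre
    obtain ⟨-, htl⟩ := List.cons_prefix_cons.mp hpre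
    have ht := pv_prefix_reflect 'ь' pvK1 (by decide) t _ (by decide) htl
    have hfin : pvK2 <+: ('\\' :: t) := by
      unfold pvK2; exact List.cons_prefix_cons.mpr ⟨rfl, ht⟩
    rw [← List.isPrefixOf_iff_prefix, h2] at hfin
    exact Bool.false_ne_true hfin
  rw [pv_replace_cons_neg pvK2 ['ъ'] (by decide) _ _ h2']
  have h3' : pvK3.isPrefixOf ('\\' :: PySem.Chars.replace (PySem.Chars.replace t pvK1 ['ь']) pvK2 ['ъ']) = false := by
    refine Bool.eq_false_iff.mpr fun hb => ?_
    have hpre := List.isPrefixOf_iff_prefix.mp hb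
    unfold pvK3 at hpre
    obtain ⟨-, htl⟩ := List.cons_prefix_cons.mp hpre
    have ht2 := pv_prefix_reflect 'ъ' pvK2 (by decide) _ _ (by decide) htl
    have ht := pv_prefix_reflect 'ь' pvK1 (by decide) t _ (by decide) ht2
    have hfin : pvK3 <+: ('\\' :: t) := by
      unfold pvK3; exact List.cons_prefix_cons.mpr ⟨rfl, ht⟩
    rw [← List.isPrefixOf_iff_prefix, h3] at hfin
    exact Bool.false_ne_true hfin
  rw [pv_replace_cons_neg pvK3 ['й'] (by decide) _ _ h3']
  have h4' : pvK4.isPrefixOf ('\\' :: PySem.Chars.replace (PySem.Chars.replace (PySem.Chars.replace t pvK1 ['ь']) pvK2 ['ъ']) pvK3 ['й']) = false := by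
    refine Bool.eq_false_iff.mpr fun hb => ?_
    have hpre := List.isPrefixOf_iff_prefix.mp hb
    unfold pvK4 at hpre
    obtain ⟨-, htl⟩ := List.cons_prefix_cons.mp hpre
    have ht3 := pv_prefix_reflect 'й' pvK3 (by decide) _ _ (by decide) htl
    have ht2 := pv_prefix_reflect 'ъ' pvK2 (by decide) _ _ (by decide) ht3
    have ht := pv_prefix_reflect 'ь' pvK1 (by decide) t _ (by decide) ht2
    have hfin : pvK4 <+: ('\\' :: t) := by
      unfold pvK4; exact List.cons_prefix_cons.mpr ⟨rfl, ht⟩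
    rw [← List.isPrefixOf_iff_prefix, h4] at hfin
    exact Bool.false_ne_true hfin
  rw [pv_replace_cons_neg pvK4 ['ё'] (by decide) _ _ h4']
  have h5' : pvK5.isPrefixOf ('\\' :: PySem.Chars.replace (PySem.Chars.replace (PySem.Chars.replace (PySem.Chars.replace t pvK1 ['ь']) pvK2 ['ъ']) pvK3 ['й']) pvK4 ['ё']) = false := by
    refine Bool.eq_false_iff.mpr fun hb => ?_
    have hpre := List.isPrefixOf_iff_prefix.mp hb
    unfold pvK5 at hpre
    obtain ⟨-, htl⟩ := List.cons_prefix_cons.mp hpre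
    have ht4 := pv_prefix_reflect 'ё' pvK4 (by decide) _ _ (by decide) htl
    have ht3 := pv_prefix_reflect 'й' pvK3 (by decide) _ _ (by decide) ht4
    have ht2 := pv_prefix_reflect 'ъ' pvK2 (by decide) _ _ (by decide) ht3
    have ht := pv_prefix_reflect 'ь' pvK1 (by decide) t _ (by decide) ht2
    have hfin : pvK5 <+: ('\\' :: t) := by
      unfold pvK5; exact List.cons_prefix_cons.mpr ⟨rfl, ht⟩
    rw [← List.isPrefixOf_iff_prefix, h5] at hfin
    exact Bool.false_ne_true hfin
  rw [pv_replace_cons_neg pvK5 ['э'] (by decide) _ _ h5']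
  have h6' : pvK6.isPrefixOf ('\\' :: PySem.Chars.replace (PySem.Chars.replace (PySem.Chars.replace (PySem.Chars.replace (PySem.Chars.replace t pvK1 ['ь']) pvK2 ['ъ']) pvK3 ['й']) pvK4 ['ё']) pvK5 ['э']) = false := by
    refine Bool.eq_false_iff.mpr fun hb => ?_
    have hpre := List.isPrefixOf_iff_prefix.mp hb
    unfold pvK6 at hpre
    obtain ⟨-, htl⟩ := List.cons_prefix_cons.mp hpre
    have ht5 := pv_prefix_reflect 'э' pvK5 (by decide) _ _ (by decide) htl
    have ht4 := pv_prefix_reflect 'ё' pvK4 (by decide) _ _ (by decide) ht5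
    have ht3 := pv_prefix_reflect 'й' pvK3 (by decide) _ _ (by decide) ht4
    have ht2 := pv_prefix_reflect 'ъ' pvK2 (by decide) _ _ (by decide) ht3
    have ht := pv_prefix_reflect 'ь' pvK1 (by decide) t _ (by decide) ht2
    have hfin : pvK6 <+: ('\\' :: t) := by
      unfold pvK6; exact List.cons_prefix_cons.mpr ⟨rfl, ht⟩
    rw [← List.isPrefixOf_iff_prefix, h6] at hfin
    exact Bool.false_ne_true hfin
  rw [pv_replace_cons_neg pvK6 ['Э'] (by decide) _ _ h6']

lemma pv_chain_cons (c : Char) (t : List Char)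
    (h1 : pvK1.isPrefixOf (c::t) = false) (h2 : pvK2.isPrefixOf (c::t) = false)
    (h3 : pvK3.isPrefixOf (c::t) = false) (h4 : pvK4.isPrefixOf (c::t) = false)
    (h5 : pvK5.isPrefixOf (c::t) = false) (h6 : pvK6.isPrefixOf (c::t) = false) :
    pvChain (c::t) = c :: pvChain t := by
  by_cases hc : c = '\\'
  · subst hc; exact pv_chain_cons_bs t h1 h2 h3 h4 h5 h6
  · unfold pvChain pvR1 pvR2 pvR3 pvR4 pvR5 pvR6
    rw [show (c :: t : List Char) = [c] ++ t from rfl]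
    rw [pv_pass_block pvK1 ['ь'] _ rfl [c] (by simp [Ne.symm hc])]
    rw [pv_pass_block pvK2 ['ъ'] _ rfl [c] (by simp [Ne.symm hc])]
    rw [pv_pass_block pvK3 ['й'] _ rfl [c] (by simp [Ne.symm hc])]
    rw [pv_pass_block pvK4 ['ё'] _ rfl [c] (by simp [Ne.symm hc])]
    rw [pv_pass_block pvK5 ['э'] _ rfl [c] (by simp [Ne.symm hc])]
    rw [pv_pass_block pvK6 ['Э'] _ rfl [c] (by simp [Ne.symm hc])]
    simp

lemma pv_main : ∀ l, pvChain l = pvScan l := by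
  intro l
  induction hl : l.length using Nat.strong_induction_on generalizing l with
  | _ n IH =>
    match l with
    | [] =>
      unfold pvChain pvR1 pvR2 pvR3 pvR4 pvR5 pvR6 pvScan
      rw [pv_replace_nil _ _ (by decide), pv_replace_nil _ _ (by decide),
          pv_replace_nil _ _ (by decide), pv_replace_nil _ _ (by decide),
          pv_replace_nil _ _ (by decide), pv_replace_nil _ _ (by decide)]
    | c :: t =>
      rw [pvScan]
      by_cases hp1 : pvK1.isPrefixOf (c :: t) = true
      · obtain ⟨u, hu⟩ := List.isPrefixOf_iff_prefix.mp hp1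
        have hd : (c :: t).drop pvK1.length = u := by rw [← hu, List.drop_left]
        have hlu : u.length < n := by
          have := congrArg List.length hu
          simp [pvK1] at this
          have hn : t.length + 1 = n := by simpa using hl
          omega
        rw [if_pos hp1, hd, ← hu, pv_chain_match1 u, IH u.length hlu u rfl]
      by_cases hp2 : pvK2.isPrefixOf (c :: t) = true
      · obtain ⟨u, hu⟩ := List.isPrefixOf_iff_prefix.mp hp2
        have hd : (c :: t).drop pvK2.length = u := by rw [← hu, List.drop_left]
        have hlu : u.length < n := by
          have := congrArg List.length hu
          simp [pvK2] at this
          have hn : t.length + 1 = n := by simpa using hl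
          omega
        rw [if_neg hp1, if_pos hp2, hd, ← hu, pv_chain_match2 u, IH u.length hlu u rfl]
      by_cases hp3 : pvK3.isPrefixOf (c :: t) = true
      · obtain ⟨u, hu⟩ := List.isPrefixOf_iff_prefix.mp hp3
        have hd : (c :: t).drop pvK3.length = u := by rw [← hu, List.drop_left]
        have hlu : u.length < n := by
          have := congrArg List.length hu
          simp [pvK3] at this
          have hn : t.length + 1 = n := by simpa using hl
          omega
        rw [if_neg hp1, if_neg hp2, if_pos hp3, hd, ← hu, pv_chain_match3 u, IH u.length hlu u rfl]
      by_cases hp4 : pvK4.isPrefixOf (c :: t) = true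
      · obtain ⟨u, hu⟩ := List.isPrefixOf_iff_prefix.mp hp4
        have hd : (c :: t).drop pvK4.length = u := by rw [← hu, List.drop_left]
        have hlu : u.length < n := by
          have := congrArg List.length hu
          simp [pvK4] at this
          have hn : t.length + 1 = n := by simpa using hl
          omega
        rw [if_neg hp1, if_neg hp2, if_neg hp3, if_pos hp4, hd, ← hu, pv_chain_match4 u, IH u.length hlu u rfl]
      by_cases hp5 : pvK5.isPrefixOf (c :: t) = true
      · obtain ⟨u, hu⟩ := List.isPrefixOf_iff_prefix.mp hp5
        have hd : (c :: t).drop pvK5.length = u := by rw [← hu, List.drop_left]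
        have hlu : u.length < n := by
          have := congrArg List.length hu
          simp [pvK5] at this
          have hn : t.length + 1 = n := by simpa using hl
          omega
        rw [if_neg hp1, if_neg hp2, if_neg hp3, if_neg hp4, if_pos hp5, hd, ← hu, pv_chain_match5 u, IH u.length hlu u rfl]
      by_cases hp6 : pvK6.isPrefixOf (c :: t) = true
      · obtain ⟨u, hu⟩ := List.isPrefixOf_iff_prefix.mp hp6
        have hd : (c :: t).drop pvK6.length = u := by rw [← hu, List.drop_left]
        have hlu : u.length < n := by
          have := congrArg List.length hu
          simp [pvK6] at this
          have hn : t.length + 1 = n := by simpa using hl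
          omega
        rw [if_neg hp1, if_neg hp2, if_neg hp3, if_neg hp4, if_neg hp5, if_pos hp6, hd, ← hu, pv_chain_match6 u, IH u.length hlu u rfl]
      rw [if_neg hp1, if_neg hp2, if_neg hp3, if_neg hp4, if_neg hp5, if_neg hp6]
      rw [pv_chain_cons c t (Bool.eq_false_iff.mpr hp1) (Bool.eq_false_iff.mpr hp2)
            (Bool.eq_false_iff.mpr hp3) (Bool.eq_false_iff.mpr hp4)
            (Bool.eq_false_iff.mpr hp5) (Bool.eq_false_iff.mpr hp6)]
      rw [IH t.length (by simp at hl; omega) t rfl]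

lemma pv_items : pvTableA.items =
    [("\\cprime","ь"),("\\cdprime","ъ"),("\\u{i}","й"),("\\\"{e}","ё"),("\\`{e}","э"),("\\`{E}","Э")] := by
  decide

-- ===== VERDICT (by name: the statement is the Claim_ definition above) =====
theorem latex_to_unicode_cyrillic_spec : Claim_equal_latex_to_unicode_cyrillic := by
  intro s _
  unfold Spec_latex_to_unicode_cyrillic
  unfold latex_to_unicode_cyrillic latex_to_unicode_cyrillic_alt
  rw [pv_items]
  simp only [List.foldl]
  have hA : ∀ x : String, ∀ old new : String,
      PySem.Str.replace x old new = String.ofList (PySem.Chars.replace x.toList old.toList new.toList) := by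
    intro x old new; rfl
  rw [hA, hA, hA, hA, hA, hA]
  simp only [String.toList_ofList]
  rw [show ("\\cprime" : String).toList = pvK1 from rfl,
      show ("\\cdprime" : String).toList = pvK2 from rfl,
      show ("\\u{i}" : String).toList = pvK3 from rfl,
      show ("\\\"{e}" : String).toList = pvK4 from rfl,
      show ("\\`{e}" : String).toList = pvK5 from rfl,
      show ("\\`{E}" : String).toList = pvK6 from rfl,
      show ("ь" : String).toList = ['ь'] from rfl,
      show ("ъ" : String).toList = ['ъ'] from rfl,
      show ("й" : String).toList = ['й'] from rfl,
      show ("ё" : String).toList = ['ё'] from rfl,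
      show ("э" : String).toList = ['э'] from rfl,
      show ("Э" : String).toList = ['Э'] from rfl]
  have hm := pv_main s.toList
  unfold pvChain pvR1 pvR2 pvR3 pvR4 pvR5 pvR6 at hm
  rw [hm]
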